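-- pv_equiv track=rewrite | github.com/scsa3/my-leetcode | src/easy/1588.py | foo
-- ===== SOURCE A (Python) =====
-- from typing import List
--
-- def foo(numbers: List[int], times: int) -> list:
--     down_index = len(numbers) - times
--     if times > len(numbers) // 2:
--         down_index = len(numbers) // 2
--     result = []
--     v = 0
--     for i in range(len(numbers)):
--         if i < times:
--             v += 1
--         elif i > down_index:
--             v -= 1
--         result.append(v)
--     return result
-- ===== SOURCE B (Python) =====
-- def foo(numbers, times):
--     n = len(numbers)
--     down_index = n // 2 if times > n // 2 else n - times
--     start = max(times, down_index + 1)
--     return [max(0, min(i + 1, times)) - max(0, i - start + 1) for i in range(n)]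
-- ===== Notes on version B (the rewrite author's own statement) =====
-- stated objective: alternative
-- what changed: Replaces A's running counter threaded through the loop with a list comprehension computing each element directly from its index via a closed-form ramp/plateau/ramp expression.
import Mathlib
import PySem

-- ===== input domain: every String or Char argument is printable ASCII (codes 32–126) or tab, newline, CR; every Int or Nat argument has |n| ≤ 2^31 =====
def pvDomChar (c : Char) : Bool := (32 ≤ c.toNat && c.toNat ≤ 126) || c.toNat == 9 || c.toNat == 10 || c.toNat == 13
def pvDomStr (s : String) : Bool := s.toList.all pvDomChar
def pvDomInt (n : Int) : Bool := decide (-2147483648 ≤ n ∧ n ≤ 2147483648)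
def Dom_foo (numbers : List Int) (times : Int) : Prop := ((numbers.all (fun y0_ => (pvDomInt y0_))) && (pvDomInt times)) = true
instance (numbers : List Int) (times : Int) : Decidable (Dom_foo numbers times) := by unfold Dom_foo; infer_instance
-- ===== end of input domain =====

-- B replaces A's running counter with a per-index closed form (ramp up / plateau / ramp down); same cost, different decomposition.

-- ===== PORT A =====
def foo (numbers : List Int) (times : Int) : List Int :=
  let down_index : Int :=
    if times > PySem.Int.floordiv (numbers.length : Int) 2 then
      PySem.Int.floordiv (numbers.length : Int) 2
    else (numbers.length : Int) - times
  ((PySem.List.pyRange 0 (numbers.length : Int) 1).foldl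
    (fun (st : List Int × Int) (i : Int) =>
      let v : Int := if i < times then st.2 + 1 else if i > down_index then st.2 - 1 else st.2
      (st.1 ++ [v], v)) ([], 0)).1

-- ===== PORT B =====
def foo_alt (numbers : List Int) (times : Int) : List Int :=
  let down_index : Int :=
    if times > PySem.Int.floordiv (numbers.length : Int) 2 then
      PySem.Int.floordiv (numbers.length : Int) 2
    else (numbers.length : Int) - times
  let start : Int := max times (down_index + 1)
  (PySem.List.pyRange 0 (numbers.length : Int) 1).map
    (fun i => max 0 (min (i + 1) times) - max 0 (i - start + 1))

-- ===== PRECONDITION & SPEC =====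
def Spec_foo (numbers : List Int) (times : Int) (out : List Int) : Prop := out = foo_alt numbers times
instance (numbers : List Int) (times : Int) (out : List Int) : Decidable (Spec_foo numbers times out) := by unfold Spec_foo; infer_instance

-- ===== CLAIM (what is proved, stated in full; the proofs are below) =====
def Claim_equal_foo : Prop := ∀ (numbers : List Int) (times : Int), Dom_foo numbers times → Spec_foo numbers times (foo numbers times)

-- ===== LEMMAS AND PROOFS =====

-- Invariant: after processing range(0, n), the accumulator list is the closed-form map and
-- the running counter equals the closed form evaluated just past the last index.
theorem foo_fold_closed (times down_index : Int) (hd : 0 ≤ down_index) (n : Nat) :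
    (PySem.List.pyRange 0 (n : Int) 1).foldl
      (fun (st : List Int × Int) (i : Int) =>
        let v : Int := if i < times then st.2 + 1 else if i > down_index then st.2 - 1 else st.2
        (st.1 ++ [v], v)) ([], 0)
    = ((PySem.List.pyRange 0 (n : Int) 1).map
         (fun i => max 0 (min (i + 1) times) - max 0 (i - max times (down_index + 1) + 1)),
       max 0 (min (n : Int) times) - max 0 ((n : Int) - max times (down_index + 1))) := by
  induction n with
  | zero =>
      rw [PySem.List.pyRange_one_eq_nil (by omega)]
      simp only [List.foldl_nil, List.map_nil]
      refine Prod.ext rfl ?_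
      simp only
      omega
  | succ m ih =>
      have hcast : ((m + 1 : Nat) : Int) = (m : Int) + 1 := by push_cast; ring
      rw [hcast, PySem.List.pyRange_one_succ_right (by omega)]
      rw [List.foldl_append, List.map_append, ih]
      simp only [List.foldl_cons, List.foldl_nil, List.map_cons, List.map_nil]
      refine Prod.ext ?_ ?_
      · simp only
        congr 1
        simp only [List.cons.injEq, and_true]
        split_ifs <;> omega
      · simp only
        split_ifs <;> omega

-- ===== VERDICT (by name: the statement is the Claim_ definition above) =====
theorem foo_spec : Claim_equal_foo := by
  intro numbers times _
  unfold Spec_foo foo foo_alt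
  simp only
  set di : Int :=
    if times > PySem.Int.floordiv (numbers.length : Int) 2 then
      PySem.Int.floordiv (numbers.length : Int) 2
    else (numbers.length : Int) - times with hdi
  have hfd : PySem.Int.floordiv (numbers.length : Int) 2 = ((numbers.length / 2 : Nat) : Int) := by
    exact_mod_cast PySem.Int.floordiv_natCast numbers.length 2
  have hd : 0 ≤ di := by
    rw [hdi]
    split_ifs with h
    · omega
    · rw [hfd] at h
      have : (numbers.length / 2 : Nat) ≤ numbers.length := Nat.div_le_self _ _
      omega
  rw [foo_fold_closed times di hd numbers.length]
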